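-- pv_equiv track=rewrite | github.com/add4user/knobo | userport/utils.py | to_urlsafe_path
-- ===== SOURCE A (Python) =====
-- from typing import List
--
-- def to_urlsafe_path(text: str) -> str:
--     """
--     Converts input text into a string that can be used in URL path.
--     We only keep alphanumeric characters (in lowercase form) and converts spaces to hypens.
--     We also want to stop parsing if we hit encounter an opening bracket (likely indicating a URL)
--     until we encounter the corresponding closing bracket.
--     """
--     new_text_list: List[str] = []
--     inside_open_bracket: bool = False
--     for splitstr in text.split(" "):
--         new_split_str_list: List[str] = []
--         for c in splitstr:
--             if c == "(":
--                 inside_open_bracket = True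
--             elif c == ")":
--                 inside_open_bracket = False
--             if inside_open_bracket:
--                 # Stop parsing characters while inside brackets.
--                 continue
--             if c.isalnum():
--                 new_split_str_list.append(c.lower())
--         new_text_list.append("".join(new_split_str_list))
--     return "-".join(new_text_list)
-- ===== SOURCE B (Python) =====
-- def to_urlsafe_path(text: str) -> str:
--     # Single flat pass over the characters; no split/join.
--     result = []
--     inside_open_bracket = False
--     for c in text:
--         if c == " ":
--             result.append("-")
--             continue
--         if c == "(":
--             inside_open_bracket = True
--         elif c == ")":
--             inside_open_bracket = False
--         if inside_open_bracket:
--             continue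
--         if c.isalnum():
--             result.append(c.lower())
--     return "".join(result)
-- ===== Notes on version B (the rewrite author's own statement) =====
-- stated objective: simpler
-- what changed: Replaces split-on-space / per-word inner loop / '-'.join with one flat loop over the characters that emits '-' for each space directly.
import Mathlib
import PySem

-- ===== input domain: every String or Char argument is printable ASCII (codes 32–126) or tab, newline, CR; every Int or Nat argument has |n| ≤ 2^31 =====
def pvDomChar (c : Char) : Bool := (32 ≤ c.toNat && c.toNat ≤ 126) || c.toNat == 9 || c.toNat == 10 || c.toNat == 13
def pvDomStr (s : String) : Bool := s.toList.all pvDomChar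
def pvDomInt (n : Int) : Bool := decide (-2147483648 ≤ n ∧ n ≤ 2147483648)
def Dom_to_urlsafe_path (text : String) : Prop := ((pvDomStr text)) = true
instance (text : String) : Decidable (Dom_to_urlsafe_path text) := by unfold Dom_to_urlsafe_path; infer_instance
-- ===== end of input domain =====

-- B replaces A's split-on-space / per-word loop / '-'.join with one flat character loop (objective: simpler).

-- ===== PORT A =====
-- inner `for c in splitstr` loop body: state = (new_split_str_list, inside_open_bracket)
def pvInnerStep (st : List Char × Bool) (c : Char) : List Char × Bool :=
  let flag := if c = '(' then true else if c = ')' then false else st.2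
  if flag then (st.1, flag)
  else if PySem.Chars.isalnum c then (st.1 ++ [PySem.Chars.lowerChar c], flag)
  else (st.1, flag)

-- outer `for splitstr in text.split(" ")` loop: state = (new_text_list, inside_open_bracket)
def pvOuter : List (List Char) → List (List Char) × Bool → List (List Char) × Bool
  | [], st => st
  | w :: ws, (acc, flag) =>
      let r := w.foldl pvInnerStep ([], flag)
      pvOuter ws (acc ++ [r.1], r.2)

def to_urlsafe_path (text : String) : String :=
  String.ofList (PySem.Chars.join ['-']
    (pvOuter (PySem.Chars.splitOn text.toList [' ']) ([], false)).1)

-- ===== PORT B =====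
-- the flat loop of Source B: state = (result, inside_open_bracket)
def pvAltStep (st : List Char × Bool) (c : Char) : List Char × Bool :=
  if c = ' ' then (st.1 ++ ['-'], st.2)
  else
    let flag := if c = '(' then true else if c = ')' then false else st.2
    if flag then (st.1, flag)
    else if PySem.Chars.isalnum c then (st.1 ++ [PySem.Chars.lowerChar c], flag)
    else (st.1, flag)

def to_urlsafe_path_alt (text : String) : String :=
  String.ofList (text.toList.foldl pvAltStep ([], false)).1

-- ===== PRECONDITION & SPEC =====
def Spec_to_urlsafe_path (text : String) (out : String) : Prop := out = to_urlsafe_path_alt text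
instance (text : String) (out : String) : Decidable (Spec_to_urlsafe_path text out) := by unfold Spec_to_urlsafe_path; infer_instance

-- ===== CLAIM (what is proved, stated in full; the proofs are below) =====
def Claim_equal_to_urlsafe_path : Prop := ∀ (text : String), Dom_to_urlsafe_path text → Spec_to_urlsafe_path text (to_urlsafe_path text)

-- ===== LEMMAS AND PROOFS =====

-- structural characterisation of splitting on a single space
def pvSplit : List Char → List (List Char)
  | [] => [[]]
  | c :: rest => if c = ' ' then [] :: pvSplit rest else (pvSplit rest).modifyHead (c :: ·)

theorem pvSplit_ne_nil (cs : List Char) : pvSplit cs ≠ [] := by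
  cases cs with
  | nil => simp [pvSplit]
  | cons c rest =>
    simp only [pvSplit]
    split_ifs
    · simp
    · cases h : pvSplit rest with
      | nil => exact absurd h (pvSplit_ne_nil rest)
      | cons a t => simp

theorem splitOn_go_space (l cur : List Char) (acc : List (List Char)) (fuel : Nat)
    (hf : l.length ≤ fuel) :
    PySem.Chars.splitOn.go [' '] fuel l cur acc
      = acc.reverse ++ (pvSplit l).modifyHead (cur.reverse ++ ·) := by
  induction fuel generalizing l cur acc with
  | zero =>
    have : l = [] := by cases l <;> simp_all
    subst this
    simp [PySem.Chars.splitOn.go, pvSplit]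
  | succ fuel ih =>
    cases l with
    | nil => simp [PySem.Chars.splitOn.go, pvSplit]
    | cons c rest =>
      by_cases hc : c = ' '
      · subst hc
        rw [show PySem.Chars.splitOn.go [' '] (fuel+1) (' ' :: rest) cur acc
              = PySem.Chars.splitOn.go [' '] fuel rest [] (cur.reverse :: acc) by
            simp [PySem.Chars.splitOn.go, List.isPrefixOf]]
        rw [ih rest [] (cur.reverse :: acc) (by simpa using Nat.le_of_succ_le_succ (by simpa using hf))]
        cases h : pvSplit rest with
        | nil => exact absurd h (pvSplit_ne_nil rest)
        | cons a t => simp [pvSplit, h]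
      · rw [show PySem.Chars.splitOn.go [' '] (fuel+1) (c :: rest) cur acc
              = PySem.Chars.splitOn.go [' '] fuel rest (c :: cur) acc by
            simp only [PySem.Chars.splitOn.go, List.isPrefixOf]
            simp
            intro h
            exact absurd h.symm hc]
        rw [ih rest (c :: cur) acc (by simpa using Nat.le_of_succ_le_succ (by simpa using hf))]
        cases h : pvSplit rest with
        | nil => exact absurd h (pvSplit_ne_nil rest)
        | cons a t => simp [pvSplit, h, hc]

theorem splitOn_space (cs : List Char) :
    PySem.Chars.splitOn cs [' '] = pvSplit cs := by
  rw [PySem.Chars.splitOn, splitOn_go_space cs [] [] _ (Nat.le_succ _)]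
  cases pvSplit cs <;> simp

-- front-building versions of the two accumulator loops
def pvInnerF : Bool → List Char → List Char × Bool
  | flag, [] => ([], flag)
  | flag, c :: rest =>
      let f := if c = '(' then true else if c = ')' then false else flag
      if f then pvInnerF f rest
      else if PySem.Chars.isalnum c then
        ((PySem.Chars.lowerChar c) :: (pvInnerF f rest).1, (pvInnerF f rest).2)
      else pvInnerF f rest

theorem innerF_eq (w : List Char) (acc : List Char) (flag : Bool) :
    w.foldl pvInnerStep (acc, flag)
      = (acc ++ (pvInnerF flag w).1, (pvInnerF flag w).2) := by
  induction w generalizing acc flag with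
  | nil => simp [pvInnerF]
  | cons c rest ih =>
    simp only [List.foldl_cons, pvInnerStep, pvInnerF]
    split_ifs with h1 h2 <;> simp [ih]

def pvOuterF : Bool → List (List Char) → List (List Char) × Bool
  | flag, [] => ([], flag)
  | flag, w :: ws =>
      ((pvInnerF flag w).1 :: (pvOuterF (pvInnerF flag w).2 ws).1,
       (pvOuterF (pvInnerF flag w).2 ws).2)

theorem outerF_eq (ws : List (List Char)) (acc : List (List Char)) (flag : Bool) :
    pvOuter ws (acc, flag)
      = (acc ++ (pvOuterF flag ws).1, (pvOuterF flag ws).2) := by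
  induction ws generalizing acc flag with
  | nil => simp [pvOuter, pvOuterF]
  | cons w ws ih => simp [pvOuter, pvOuterF, innerF_eq, ih]

def pvAltF : Bool → List Char → List Char × Bool
  | flag, [] => ([], flag)
  | flag, c :: rest =>
      if c = ' ' then ('-' :: (pvAltF flag rest).1, (pvAltF flag rest).2)
      else
        let f := if c = '(' then true else if c = ')' then false else flag
        if f then pvAltF f rest
        else if PySem.Chars.isalnum c then
          ((PySem.Chars.lowerChar c) :: (pvAltF f rest).1, (pvAltF f rest).2)
        else pvAltF f rest

theorem altF_eq (cs : List Char) (acc : List Char) (flag : Bool) :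
    cs.foldl pvAltStep (acc, flag)
      = (acc ++ (pvAltF flag cs).1, (pvAltF flag cs).2) := by
  induction cs generalizing acc flag with
  | nil => simp [pvAltF]
  | cons c rest ih =>
    simp only [List.foldl_cons, pvAltStep, pvAltF]
    split_ifs with h1 h2 h3 <;> simp [ih]

-- the heart: joining the per-word outputs with '-' is the flat loop
theorem main_lemma (cs : List Char) (flag : Bool) :
    PySem.Chars.join ['-'] (pvOuterF flag (pvSplit cs)).1 = (pvAltF flag cs).1 := by
  induction cs generalizing flag with
  | nil => simp [pvSplit, pvOuterF, pvInnerF, pvAltF, PySem.Chars.join_singleton]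
  | cons c rest ih =>
    by_cases hc : c = ' '
    · subst hc
      have hsplit : pvSplit (' ' :: rest) = [] :: pvSplit rest := by simp [pvSplit]
      have halt : (pvAltF flag (' ' :: rest)).1 = '-' :: (pvAltF flag rest).1 := by
        simp [pvAltF]
      rw [hsplit, halt]
      have h1 : (pvOuterF flag ([] :: pvSplit rest)).1
          = [] :: (pvOuterF flag (pvSplit rest)).1 := by
        simp [pvOuterF, pvInnerF]
      rw [h1]
      cases hsp : pvSplit rest with
      | nil => exact absurd hsp (pvSplit_ne_nil rest)
      | cons a t =>
        have ihf := ih flag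
        rw [hsp] at ihf
        have h2 : (pvOuterF flag (a :: t)).1
            = (pvInnerF flag a).1 :: (pvOuterF (pvInnerF flag a).2 t).1 := by
          simp [pvOuterF]
        rw [h2] at ihf ⊢
        rw [PySem.Chars.join_cons_cons, ihf]
        simp
    · have hsplit : pvSplit (c :: rest) = (pvSplit rest).modifyHead (c :: ·) := by
        simp [pvSplit, hc]
      rw [hsplit]
      cases hsp : pvSplit rest with
      | nil => exact absurd hsp (pvSplit_ne_nil rest)
      | cons a t =>
        simp only [List.modifyHead]
        set f := if c = '(' then true else if c = ')' then false else flag with hf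
        have ihf := ih f
        rw [hsp] at ihf
        have houter : (pvOuterF f (a :: t)).1
            = (pvInnerF f a).1 :: (pvOuterF (pvInnerF f a).2 t).1 := by
          simp [pvOuterF]
        rw [houter] at ihf
        have hin : pvInnerF flag (c :: a)
            = if f then pvInnerF f a
              else if PySem.Chars.isalnum c then
                ((PySem.Chars.lowerChar c) :: (pvInnerF f a).1, (pvInnerF f a).2)
              else pvInnerF f a := by
          rw [pvInnerF, hf]
        have halt : pvAltF flag (c :: rest)
            = if f then pvAltF f rest
              else if PySem.Chars.isalnum c then
                ((PySem.Chars.lowerChar c) :: (pvAltF f rest).1, (pvAltF f rest).2)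
              else pvAltF f rest := by
          rw [pvAltF, if_neg hc, hf]
        have hstep : (pvOuterF flag ((c :: a) :: t)).1
            = (pvInnerF flag (c :: a)).1 :: (pvOuterF (pvInnerF flag (c :: a)).2 t).1 := by
          simp [pvOuterF]
        rw [hstep, hin, halt]
        split_ifs with h1 h2
        · exact ihf
        · simp only
          cases hL : (pvOuterF (pvInnerF f a).2 t).1 with
          | nil =>
            rw [hL] at ihf
            rw [PySem.Chars.join_singleton] at ihf
            rw [PySem.Chars.join_singleton, ihf]
          | cons b l =>
            rw [hL] at ihf
            rw [PySem.Chars.join_cons_cons] at ihf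
            rw [PySem.Chars.join_cons_cons]
            simp only [List.cons_append]
            rw [ihf]
        · exact ihf

-- ===== VERDICT (by name: the statement is the Claim_ definition above) =====
theorem to_urlsafe_path_spec : Claim_equal_to_urlsafe_path := by
  intro text _
  show to_urlsafe_path text = to_urlsafe_path_alt text
  unfold to_urlsafe_path to_urlsafe_path_alt
  rw [splitOn_space, outerF_eq, altF_eq]
  simp [main_lemma]
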